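-- pv_equiv track=rewrite | github.com/geometalab/docker-world-pbf-provisioner | pbf_processor/cutter/cut_pbf.py | _create_bounds
-- ===== SOURCE A (Python) =====
-- def _create_bounds(start, end, step):
--     bounds = []
--     old_value = None
--     for index, i in enumerate(range(start, end + 1, step)):
--         if old_value is None:
--             old_value = i
--             continue
--         bounds.append((old_value, i))
--         old_value = i
--     return bounds
-- ===== SOURCE B (Python) =====
-- def _create_bounds(start, end, step):
--     # Closed form: compute the sample count arithmetically, then build each
--     # pair directly from its index without materializing the range.
--     if step > 0:
--         n = (end + 1 - start + step - 1) // step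
--     else:
--         n = (start - end - 1 - step - 1) // (-step)
--     return [(start + k * step, start + (k + 1) * step) for k in range(max(n - 1, 0))]
-- ===== Notes on version B (the rewrite author's own statement) =====
-- stated objective: alternative
-- what changed: Replaces the stateful enumerate loop threading a previous-value sentinel with a closed-form construction: the sample count is computed arithmetically by floor division and each (lower, upper) pair is built directly from its index, never materializing the sampled range itself.
import Mathlib
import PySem

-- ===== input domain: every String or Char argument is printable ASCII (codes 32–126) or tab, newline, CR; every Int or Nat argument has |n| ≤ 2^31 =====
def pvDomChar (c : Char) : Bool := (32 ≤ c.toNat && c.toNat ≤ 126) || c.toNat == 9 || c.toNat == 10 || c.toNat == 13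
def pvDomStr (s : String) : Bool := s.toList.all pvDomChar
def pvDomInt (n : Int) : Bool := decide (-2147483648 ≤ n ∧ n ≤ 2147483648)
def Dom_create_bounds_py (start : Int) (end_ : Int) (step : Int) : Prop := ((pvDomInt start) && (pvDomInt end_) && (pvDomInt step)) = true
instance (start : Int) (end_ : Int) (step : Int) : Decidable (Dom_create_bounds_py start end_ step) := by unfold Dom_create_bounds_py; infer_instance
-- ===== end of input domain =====

-- B replaces the stateful previous-value loop over the range by a closed-form
-- construction: the sample count is computed arithmetically and each pair is
-- built directly from its index (objective: alternative/simpler decomposition).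

-- ===== PORT A =====
-- Literal port of A: fold over range(start, end+1, step) threading (bounds, old_value);
-- bounds is accumulated in reverse and reversed at the end so evaluation stays linear
-- (the Python appends at the back in amortized O(1)); the loop and state are A's.
def create_bounds_py (start : Int) (end_ : Int) (step : Int) : List (Int × Int) :=
  ((PySem.List.pyRange start (end_ + 1) step).foldl
    (fun (st : List (Int × Int) × Option Int) (i : Int) =>
      match st.2 with
      | none => (st.1, some i)
      | some v => ((v, i) :: st.1, some i))
    ([], none)).1.reverse

-- ===== PORT B =====
-- Port of B: compute the sample count with Python floor division, then build
-- each pair from its index over range(max(n-1, 0)).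
def create_bounds_py_alt (start : Int) (end_ : Int) (step : Int) : List (Int × Int) :=
  let n : Int :=
    if 0 < step then PySem.Int.floordiv (end_ + 1 - start + step - 1) step
    else PySem.Int.floordiv (start - end_ - 1 - step - 1) (-step)
  (PySem.List.pyRange 0 (max (n - 1) 0) 1).map
    (fun k => (start + k * step, start + (k + 1) * step))

-- ===== PRECONDITION & SPEC =====
-- Pre_ excludes step = 0, on which Python's range raises ValueError.
def Pre_create_bounds_py (start : Int) (end_ : Int) (step : Int) : Prop := step ≠ 0
instance (start : Int) (end_ : Int) (step : Int) : Decidable (Pre_create_bounds_py start end_ step) := by unfold Pre_create_bounds_py; infer_instance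
def pvWitness_create_bounds_py : Int × Int × Int := (0, 10, 2)
def Spec_create_bounds_py (start : Int) (end_ : Int) (step : Int) (out : List (Int × Int)) : Prop := out = create_bounds_py_alt start end_ step
instance (start : Int) (end_ : Int) (step : Int) (out : List (Int × Int)) : Decidable (Spec_create_bounds_py start end_ step out) := by unfold Spec_create_bounds_py; infer_instance

-- ===== CLAIM (what is proved, stated in full; the proofs are below) =====
def Claim_equal_create_bounds_py : Prop := ∀ (start : Int) (end_ : Int) (step : Int), Dom_create_bounds_py start end_ step → Pre_create_bounds_py start end_ step → Spec_create_bounds_py start end_ step (create_bounds_py start end_ step)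

-- ===== LEMMAS AND PROOFS =====
-- A's loop over a list l starting with previous value v yields the adjacent pairs of v :: l.
theorem pv_foldl_pairs (l : List Int) (acc : List (Int × Int)) (v : Int) :
    (l.foldl
      (fun (st : List (Int × Int) × Option Int) (i : Int) =>
        match st.2 with
        | none => (st.1, some i)
        | some v => ((v, i) :: st.1, some i))
      (acc, some v)).1.reverse = acc.reverse ++ List.zip (v :: l) l := by
  induction l generalizing acc v with
  | nil => simp
  | cons h t ih => simp [List.foldl, ih]

-- zipping a mapped range with its own tail = mapping adjacent index pairs.
theorem pv_zip_map_range_tail (f : ℕ → Int) (c : ℕ) :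
    (((List.range c).map f).zip ((List.range c).map f).tail)
      = (List.range (c - 1)).map (fun k => (f k, f (k + 1))) := by
  apply List.ext_getElem
  · simp
  · intro k h1 h2
    simp [List.getElem_zip, List.getElem_tail]

-- A's whole loop over a mapped range, in closed form.
theorem pv_core (f : ℕ → Int) (c : ℕ) :
    (((List.range c).map f).foldl
      (fun (st : List (Int × Int) × Option Int) (i : Int) =>
        match st.2 with
        | none => (st.1, some i)
        | some v => ((v, i) :: st.1, some i))
      ([], none)).1.reverse = (List.range (c - 1)).map (fun k => (f k, f (k + 1))) := by
  cases c with
  | zero => simp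
  | succ c =>
    have h : (List.range (c + 1)).map f = f 0 :: (List.range c).map (f ∘ Nat.succ) := by
      rw [List.range_succ_eq_map, List.map_cons, List.map_map]
    rw [h, List.foldl_cons]
    rw [pv_foldl_pairs, ← h]
    have h3 : (List.range c).map (f ∘ Nat.succ) = ((List.range (c + 1)).map f).tail := by
      rw [List.range_succ_eq_map, List.map_cons, List.map_map]; rfl
    rw [h3, pv_zip_map_range_tail]
    simp

-- count arithmetic: B's max(n-1,0) (n by floor division) matches pyRange's count minus one.
theorem pv_count (d s : Int) (hs : 0 < s) :
    (max ((d + s - 1).fdiv s - 1) 0).toNat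
      = (if 0 < d then ((d + s - 1) / s).toNat else 0) - 1 := by
  rw [Int.fdiv_eq_ediv, if_pos (Or.inl (le_of_lt hs)), sub_zero]
  split_ifs with hd
  · have h1 : 1 ≤ (d + s - 1) / s := by
      rw [Int.le_ediv_iff_mul_le hs]; omega
    generalize (d + s - 1) / s = q at *
    omega
  · have h0 : (d + s - 1) / s < 1 := by
      by_contra hcon
      push Not at hcon
      rw [Int.le_ediv_iff_mul_le hs] at hcon
      omega
    generalize (d + s - 1) / s = q at *
    omega

-- ===== VERDICT (by name: the statement is the Claim_ definition above) =====
theorem create_bounds_py_spec : Claim_equal_create_bounds_py := by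
  intro start end_ step _ hstep
  unfold Spec_create_bounds_py create_bounds_py create_bounds_py_alt
  rcases lt_or_gt_of_ne hstep with hneg | hpos
  · -- step < 0
    have hns : ¬ (0 < step) := by omega
    simp only [PySem.List.pyRange_one, sub_zero]
    simp only [PySem.List.pyRange, if_neg hstep, if_neg hns, PySem.Int.floordiv,
      show (end_ + 1 < start) ↔ (0 < start - (end_ + 1)) from by omega]
    rw [pv_core, List.map_map,
      show start - end_ - 1 - step - 1 = start - (end_ + 1) + -step - 1 from by ring,
      pv_count (start - (end_ + 1)) (-step) (by omega)]
    apply List.map_congr_left; intro k _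
    simp only [Function.comp]
    simp only [Prod.mk.injEq]
    constructor <;> push_cast <;> ring
  · -- 0 < step
    simp only [PySem.List.pyRange_one, sub_zero]
    simp only [PySem.List.pyRange, if_neg hstep, if_pos hpos, PySem.Int.floordiv,
      show (start < end_ + 1) ↔ (0 < end_ + 1 - start) from by omega]
    rw [pv_core, List.map_map,
      pv_count (end_ + 1 - start) step hpos]
    apply List.map_congr_left; intro k _
    simp only [Function.comp]
    simp only [Prod.mk.injEq]
    constructor <;> push_cast <;> ring
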